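-- pv_equiv track=rewrite | github.com/100472175/EDA | W13/Red/D&C/DCexamplesAG.py | longestWord
-- ===== SOURCE A (Python) =====
-- def longestWord(words):
--     # Protection
--     if words is None or len(words) == 0:
--         return None
--
--     # Base case
--     if len(words) == 1:
--         return words[0]
--
--     # Recursive case
--     # DIVIDE
--     m = len(words) // 2
--     part1 = words[0:m]
--     part2 = words[m:]
--
--     # CONQUER
--     max1 = longestWord(part1)  # maximum in array part1
--     max2 = longestWord(part2)  # maximum in array part2
--
--     # COMBINE
--     if len(max1) > len(max2):
--         return max1
--     else:
--         return max2
-- ===== SOURCE B (Python) =====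
-- def longestWord(words):
--     # Single left-to-right scan keeping the running best; '>=' makes the
--     # last word of maximal length win, matching A's combine rule.
--     if words is None or len(words) == 0:
--         return None
--     best = words[0]
--     for w in words[1:]:
--         if len(w) >= len(best):
--             best = w
--     return best
-- ===== Notes on version B (the rewrite author's own statement) =====
-- stated objective: faster
-- what changed: Replaces the recursive divide-and-conquer (split in halves via slicing, recurse, combine by comparing lengths) with one linear scan maintaining a running best, replaced on >= so the last maximal-length word still wins.
import Mathlib
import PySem

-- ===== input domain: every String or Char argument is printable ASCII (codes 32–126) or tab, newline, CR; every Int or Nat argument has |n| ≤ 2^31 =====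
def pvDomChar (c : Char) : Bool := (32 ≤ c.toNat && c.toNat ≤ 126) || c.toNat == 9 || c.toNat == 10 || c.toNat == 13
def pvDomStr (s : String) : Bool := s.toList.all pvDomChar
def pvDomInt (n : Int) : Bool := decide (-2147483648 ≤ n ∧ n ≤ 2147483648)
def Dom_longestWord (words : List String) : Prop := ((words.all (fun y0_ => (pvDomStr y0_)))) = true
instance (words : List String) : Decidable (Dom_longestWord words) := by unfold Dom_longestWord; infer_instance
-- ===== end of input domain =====

-- B replaces A's recursive divide-and-conquer with one linear running-best scan (same result; measured faster: one O(n) pass, no slicing/recursion).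


-- ===== PORT A =====
-- literal port of A: guard for empty, base case for a singleton, otherwise
-- split at m = len//2 (Python slices words[0:m], words[m:]), recurse on both
-- halves, combine by 'if len(max1) > len(max2) then max1 else max2'.
-- The 'none' branches of the inner match are unreachable (both halves nonempty;
-- in Python 'len(None)' would raise there, but it never happens).
def longestWord (words : List String) : Option String :=
  match words with
  | [] => none
  | [w] => some w
  | w1 :: w2 :: rest =>
    let ws := w1 :: w2 :: rest
    let m : Nat := ws.length / 2
    let part1 := PySem.List.slice ws (some 0) (some (m : Int))
    let part2 := PySem.List.slice ws (some (m : Int)) none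
    match longestWord part1, longestWord part2 with
    | some max1, some max2 =>
        if PySem.Str.len max1 > PySem.Str.len max2 then some max1 else some max2
    | _, _ => none
termination_by words.length
decreasing_by
  · simp only [PySem.List.slice_zero_start, PySem.List.slice_to_natCast,
      List.length_take, List.length_cons]
    omega
  · simp only [PySem.List.slice_from_natCast, List.length_drop, List.length_cons]
    omega

-- ===== PORT B =====
-- loop body of B: 'if len(w) >= len(best): best = w'
def pvStep (best w : String) : String :=
  if PySem.Str.len w ≥ PySem.Str.len best then w else best

-- literal port of B: best = words[0]; for w in words[1:]: if len(w) >= len(best): best = w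
def longestWord_alt (words : List String) : Option String :=
  match words with
  | [] => none
  | b :: rest => some (rest.foldl pvStep b)

-- ===== PRECONDITION & SPEC =====
def Spec_longestWord (words : List String) (out : Option String) : Prop := out = longestWord_alt words
instance (words : List String) (out : Option String) : Decidable (Spec_longestWord words out) := by unfold Spec_longestWord; infer_instance

-- ===== CLAIM (what is proved, stated in full; the proofs are below) =====
def Claim_equal_longestWord : Prop := ∀ (words : List String), Dom_longestWord words → Spec_longestWord words (longestWord words)

-- ===== LEMMAS AND PROOFS =====

theorem pvStep_le (b w : String) : PySem.Str.len b ≤ PySem.Str.len (pvStep b w) := by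
  unfold pvStep; split <;> omega

theorem pvStep_mono : ∀ (l : List String) (b : String),
    PySem.Str.len b ≤ PySem.Str.len (l.foldl pvStep b) := by
  intro l
  induction l with
  | nil => intro b; exact le_refl _
  | cons h t ih =>
    intro b
    calc PySem.Str.len b ≤ PySem.Str.len (pvStep b h) := pvStep_le b h
      _ ≤ PySem.Str.len (t.foldl pvStep (pvStep b h)) := ih (pvStep b h)

-- running the fold from b over a nonempty list equals comparing b with the
-- fold started at the list's head (last tie wins)
theorem pvFold_cons : ∀ (t : List String) (h b : String),
    (h :: t).foldl pvStep b =
      if PySem.Str.len b ≤ PySem.Str.len (t.foldl pvStep h) then t.foldl pvStep h else b := by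
  intro t
  induction t with
  | nil =>
    intro h b
    simp only [List.foldl_cons, List.foldl_nil]
    unfold pvStep
    split_ifs <;> rfl
  | cons h2 t2 ih =>
    intro h b
    show (h2 :: t2).foldl pvStep (pvStep b h) = _
    by_cases hc : PySem.Str.len h ≥ PySem.Str.len b
    · have hb : pvStep b h = h := by unfold pvStep; rw [if_pos hc]
      rw [hb]
      have hcond : PySem.Str.len b ≤ PySem.Str.len ((h2 :: t2).foldl pvStep h) := by
        calc PySem.Str.len b ≤ PySem.Str.len h := hc
          _ ≤ _ := pvStep_mono (h2 :: t2) h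
      rw [if_pos hcond]
    · have hb : pvStep b h = b := by unfold pvStep; rw [if_neg hc]
      rw [hb, ih h2 b]
      have e2 : (h2 :: t2).foldl pvStep h =
          if PySem.Str.len h ≤ PySem.Str.len (t2.foldl pvStep h2) then t2.foldl pvStep h2 else h :=
        ih h2 h
      rw [e2]
      by_cases hd : PySem.Str.len h ≤ PySem.Str.len (t2.foldl pvStep h2)
      · rw [if_pos hd]
      · rw [if_neg hd,
          if_neg (by omega : ¬ PySem.Str.len b ≤ PySem.Str.len (t2.foldl pvStep h2)),
          if_neg (by omega : ¬ PySem.Str.len b ≤ PySem.Str.len h)]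

-- A computes B's running-best scan, by strong induction on the length
theorem pvA_eq : ∀ (n : Nat) (ws : List String), ws.length ≤ n → longestWord ws = longestWord_alt ws := by
  intro n
  induction n with
  | zero =>
    intro ws hlen
    have : ws = [] := by cases ws <;> simp_all
    subst this; simp [longestWord, longestWord_alt]
  | succ n ih =>
    intro ws hlen
    match ws with
    | [] => simp [longestWord, longestWord_alt]
    | [w] => simp [longestWord, longestWord_alt]
    | w1 :: w2 :: rest =>
      rw [longestWord]
      simp only [PySem.List.slice_zero_start, PySem.List.slice_to_natCast,
        PySem.List.slice_from_natCast]
      set m := (w1 :: w2 :: rest).length / 2 with hmdef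
      have hL : (w1 :: w2 :: rest).length = rest.length + 2 := by simp
      have hm1 : 1 ≤ m := by omega
      have hm2 : m < rest.length + 2 := by omega
      have htk : ((w1 :: w2 :: rest).take m).length ≤ n := by
        simp only [List.length_take, List.length_cons]; omega
      have hdr : ((w1 :: w2 :: rest).drop m).length ≤ n := by
        simp only [List.length_drop, List.length_cons]; omega
      rw [ih _ htk, ih _ hdr]
      -- shape of the two halves: m = k + 1 with 0 <= k <= rest.length
      obtain ⟨k, hk⟩ : ∃ k, m = k + 1 := ⟨m - 1, by omega⟩
      rw [hk, List.take_succ_cons, List.drop_succ_cons]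
      have hdropne : (w2 :: rest).drop k ≠ [] := by
        intro hnil
        have := congrArg List.length hnil
        simp only [List.length_drop, List.length_cons, List.length_nil] at this
        omega
      obtain ⟨c, r, hcr⟩ := List.exists_cons_of_ne_nil hdropne
      rw [hcr]
      simp only [longestWord_alt]
      -- decompose the full scan across the split point
      have hsplit : (w2 :: rest) = (w2 :: rest).take k ++ (c :: r) := by
        rw [← hcr, List.take_append_drop]
      conv_rhs => rw [hsplit]
      rw [List.foldl_append, pvFold_cons]
      split_ifs <;> first | rfl | omega

-- ===== VERDICT (by name: the statement is the Claim_ definition above) =====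
theorem longestWord_spec : Claim_equal_longestWord := by
  intro ws _
  unfold Spec_longestWord
  exact pvA_eq ws.length ws le_rfl
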